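-- pv_equiv track=rewrite | github.com/qilimanjaro-tech/qililab | src/qililab/digital/circuit_transpiler_passes/sabre_layout_pass.py | _extended_set
-- ===== SOURCE A (Python) =====
-- def _extended_set(
--
--     twoq_qubits: list[tuple[int, int]],
--     per_qubit: list[list[int]],
--     pos: list[int],
--     max_size: int,
-- ) -> set[int]:
--     """
--     Collect up to `max_size` upcoming 2Q gates beyond the front, scanning
--     forward along each qubit's 2Q list.
--     """
--     E: set[int] = set()
--     if max_size <= 0:
--         return E
--
--     # Start from the qubits that currently participate in front gates
--     # (i.e., those qubits whose pos[q] points to some gate).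
--     frontier_qubits = [q for q in range(len(pos)) if pos[q] < len(per_qubit[q])]
--     # Scan forward a few steps on each such qubit
--     budget = max_size
--     for q in frontier_qubits:
--         i = pos[q] + 1
--         while i < len(per_qubit[q]) and budget > 0:
--             g_idx = per_qubit[q][i]
--             E.add(g_idx)
--             budget -= 1
--             i += 1
--             if budget == 0:
--                 break
--         if budget == 0:
--             break
--     return E
-- ===== SOURCE B (Python) =====
-- def _extended_set(
--     twoq_qubits: list[tuple[int, int]],
--     per_qubit: list[list[int]],
--     pos: list[int],
--     max_size: int,
-- ) -> set[int]:
--     if max_size <= 0: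
--         return set()
--     n = len(pos)
--     # pass 1: how many candidates each qubit can contribute
--     avail = [max(0, len(per_qubit[q]) - (pos[q] + 1)) for q in range(n)]
--     # pass 2: running totals of availability before each qubit
--     prefix = [0]
--     for a in avail:
--         prefix.append(prefix[-1] + a)
--     # pass 3: arithmetic budget allocation per qubit, then collect the blocks
--     E: set[int] = set()
--     for q in range(n):
--         t = min(avail[q], max(0, max_size - prefix[q]))
--         start = pos[q] + 1
--         for g in per_qubit[q][start:start + t]:
--             E.add(g)
--     return E
-- ===== Notes on version B (the rewrite author's own statement) =====
-- stated objective: alternative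
-- what changed: B replaces A's nested scan with a shared decrementing budget and early breaks by three staged passes: it first computes each qubit's availability count, then running prefix totals, and then allocates the budget arithmetically per qubit (min(avail[q], max(0, max_size - prefix[q]))) and collects one block slice per qubit, with no inner per-element budget bookkeeping and no breaks.
-- outside the precondition, e.g. on _extended_set([], [[1, 2]], [-2], 5): A returns {1, 2}, B returns {2}
import Mathlib
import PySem

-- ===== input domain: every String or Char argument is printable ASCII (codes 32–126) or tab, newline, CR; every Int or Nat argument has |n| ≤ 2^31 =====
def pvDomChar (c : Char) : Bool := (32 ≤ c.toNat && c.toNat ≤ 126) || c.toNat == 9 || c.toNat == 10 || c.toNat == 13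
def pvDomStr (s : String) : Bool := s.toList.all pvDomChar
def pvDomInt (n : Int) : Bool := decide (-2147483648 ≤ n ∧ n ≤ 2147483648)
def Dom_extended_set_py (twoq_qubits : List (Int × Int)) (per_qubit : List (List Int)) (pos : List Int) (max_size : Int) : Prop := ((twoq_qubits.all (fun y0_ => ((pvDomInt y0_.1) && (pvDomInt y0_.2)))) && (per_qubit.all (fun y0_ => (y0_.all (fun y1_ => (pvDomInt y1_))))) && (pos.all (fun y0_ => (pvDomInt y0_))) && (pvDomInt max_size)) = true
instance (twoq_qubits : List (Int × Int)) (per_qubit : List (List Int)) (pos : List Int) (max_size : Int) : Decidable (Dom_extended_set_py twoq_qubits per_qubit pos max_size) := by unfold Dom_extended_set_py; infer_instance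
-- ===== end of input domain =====

-- B replaces A's nested loops with a threaded budget and breaks by three staged passes:
-- per-qubit availability counts, their running totals, then an arithmetic budget
-- allocation min(avail[q], max(0, max_size - prefix[q])) collecting one block slice per qubit.


-- ===== PORT A =====
-- inner while loop of A: 'while i < len(l) and budget > 0: E.add(l[i]); budget -= 1; i += 1'
-- (the trailing 'if budget == 0: break' only re-tests what the loop condition tests next;
-- fuel l.length suffices on Pre_, where i starts ≥ 0 and stays in range, so pyGetD's
-- default is never read there)
def pvAInner (l : List Int) (E : PySem.Set Int) (budget : Int) (i : Int) (fuel : Nat) : PySem.Set Int × Int :=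
  match fuel with
  | 0 => (E, budget)
  | fuel' + 1 =>
    if i < (l.length : Int) ∧ 0 < budget then
      pvAInner l (E.add (PySem.List.pyGetD l i 0)) (budget - 1) (i + 1) fuel'
    else (E, budget)

-- A: frontier filter, then per-qubit inner scan sharing a decrementing budget
-- (the outer 'if budget == 0: break' fires only when budget = 0, where every later
-- inner loop is a no-op, so the fold simply continues)
def extended_set_py (twoq_qubits : List (Int × Int)) (per_qubit : List (List Int)) (pos : List Int) (max_size : Int) : List Int :=
  if max_size ≤ 0 then PySem.Set.empty
  else
    let frontier := (PySem.List.pyRange 0 (pos.length : Int)).filter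
      (fun q => decide (PySem.List.pyGetD pos q 0 < ((PySem.List.pyGetD per_qubit q []).length : Int)))
    (frontier.foldl
      (fun (s : PySem.Set Int × Int) q =>
        pvAInner (PySem.List.pyGetD per_qubit q []) s.1 s.2 (PySem.List.pyGetD pos q 0 + 1)
          (PySem.List.pyGetD per_qubit q []).length)
      (PySem.Set.empty, max_size)).1

-- ===== PORT B =====
-- three staged passes: avail counts, running totals, then per-qubit block collection
def extended_set_py_alt (twoq_qubits : List (Int × Int)) (per_qubit : List (List Int)) (pos : List Int) (max_size : Int) : List Int :=
  if max_size ≤ 0 then PySem.Set.empty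
  else
    let n : Int := (pos.length : Int)
    let avail := (PySem.List.pyRange 0 n).map
      (fun q => max 0 (((PySem.List.pyGetD per_qubit q []).length : Int) - (PySem.List.pyGetD pos q 0 + 1)))
    let prefixs := avail.foldl (fun p a => p ++ [PySem.List.pyGetD p (-1) 0 + a]) [0]
    (PySem.List.pyRange 0 n).foldl
      (fun E q =>
        let t := min (PySem.List.pyGetD avail q 0) (max 0 (max_size - PySem.List.pyGetD prefixs q 0))
        let start := PySem.List.pyGetD pos q 0 + 1
        (PySem.List.slice (PySem.List.pyGetD per_qubit q []) (some start) (some (start + t))).foldl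
          PySem.Set.add E)
      PySem.Set.empty

-- ===== PRECONDITION & SPEC =====
-- Pre_ restricts to the natural domain of the scan (unless max_size <= 0, where both return
-- the empty set before touching the lists): per_qubit covers every qubit of pos (otherwise A
-- raises IndexError), and each pos entry is >= -1 — a pos entry <= -2 is a malformed scan
-- position on which A's Python negative-index wraparound re-reads tail elements (or raises
-- IndexError), an artefact of A's implementation.
def Pre_extended_set_py (twoq_qubits : List (Int × Int)) (per_qubit : List (List Int)) (pos : List Int) (max_size : Int) : Prop :=
  max_size ≤ 0 ∨ (pos.length ≤ per_qubit.length ∧ ∀ x ∈ pos, -1 ≤ x)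
instance (twoq_qubits : List (Int × Int)) (per_qubit : List (List Int)) (pos : List Int) (max_size : Int) : Decidable (Pre_extended_set_py twoq_qubits per_qubit pos max_size) := by unfold Pre_extended_set_py; infer_instance

def pvWitness_extended_set_py : (List (Int × Int)) × List (List Int) × List Int × Int :=
  ([(0, 1)], [[0, 1, 2], [0, 2]], [0, 0], 3)

def Spec_extended_set_py (twoq_qubits : List (Int × Int)) (per_qubit : List (List Int)) (pos : List Int) (max_size : Int) (out : List Int) : Prop := out = extended_set_py_alt twoq_qubits per_qubit pos max_size
instance (twoq_qubits : List (Int × Int)) (per_qubit : List (List Int)) (pos : List Int) (max_size : Int) (out : List Int) : Decidable (Spec_extended_set_py twoq_qubits per_qubit pos max_size out) := by unfold Spec_extended_set_py; infer_instance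

-- ===== CLAIM (what is proved, stated in full; the proofs are below) =====
def Claim_equal_extended_set_py : Prop := ∀ (twoq_qubits : List (Int × Int)) (per_qubit : List (List Int)) (pos : List Int) (max_size : Int), Dom_extended_set_py twoq_qubits per_qubit pos max_size → Pre_extended_set_py twoq_qubits per_qubit pos max_size → Spec_extended_set_py twoq_qubits per_qubit pos max_size (extended_set_py twoq_qubits per_qubit pos max_size)

-- ===== LEMMAS AND PROOFS =====

-- proof-side normal form of A's inner loop: consume a list front-to-back while budget > 0
def pvConsume (xs : List Int) (E : PySem.Set Int) (b : Int) : PySem.Set Int × Int :=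
  match xs with
  | [] => (E, b)
  | x :: xs' => if 0 < b then pvConsume xs' (E.add x) (b - 1) else (E, b)

theorem pvAInner_eq_consume (l : List Int) :
    ∀ (fuel : Nat) (i : Int) (E : PySem.Set Int) (b : Int), 0 ≤ i → l.length ≤ i.toNat + fuel →
      pvAInner l E b i fuel = pvConsume (l.drop i.toNat) E b := by
  intro fuel
  induction fuel with
  | zero =>
    intro i E b hi hlen
    rw [List.drop_eq_nil_of_le (by omega)]
    rfl
  | succ fuel ih =>
    intro i E b hi hlen
    simp only [pvAInner]
    by_cases hlt : i < (l.length : Int)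
    · have hidx : i.toNat < l.length := by omega
      rw [List.drop_eq_getElem_cons hidx]
      by_cases hb : 0 < b
      · simp only [hlt, hb, and_self, if_true, pvConsume]
        rw [PySem.List.pyGetD_of_nonneg l 0 hi, List.getD_eq_getElem l 0 hidx,
          ih (i + 1) _ _ (by omega) (by omega)]
        have h1 : (i + 1).toNat = i.toNat + 1 := by omega
        rw [h1]
      · simp only [hb, and_false, if_false, pvConsume]
    · rw [List.drop_eq_nil_of_le (by omega)]
      simp only [hlt, false_and, if_false, pvConsume]

theorem pvConsume_eq (xs : List Int) :
    ∀ (E : PySem.Set Int) (b : Int), 0 ≤ b →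
      pvConsume xs E b = (List.foldl PySem.Set.add E (xs.take b.toNat), b - min b (xs.length : Int)) := by
  induction xs with
  | nil =>
    intro E b hb
    simp only [pvConsume, List.take_nil, List.foldl_nil, List.length_nil, Nat.cast_zero,
      Prod.mk.injEq, true_and]
    omega
  | cons x xs ih =>
    intro E b hb
    by_cases hpos : 0 < b
    · have h1 : b.toNat = (b - 1).toNat + 1 := by omega
      simp only [pvConsume, if_pos hpos, h1, List.take_succ_cons, List.foldl_cons]
      rw [ih (E.add x) (b - 1) (by omega)]
      simp only [Prod.mk.injEq, List.length_cons, true_and]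
      push_cast
      omega
    · have hz : b = 0 := by omega
      subst hz
      have hlen : (0 : Int) ≤ ((x :: xs).length : Int) := by positivity
      simp only [pvConsume, if_neg hpos, Int.toNat_zero, List.take_zero, List.foldl_nil,
        Prod.mk.injEq, true_and]
      omega

theorem pvFold_consume (suffix : Nat → List Int) :
    ∀ (qs : List Nat) (E : PySem.Set Int) (b : Int), 0 ≤ b →
      qs.foldl (fun (s : PySem.Set Int × Int) q => pvConsume (suffix q) s.1 s.2) (E, b)
        = (List.foldl PySem.Set.add E (List.take b.toNat (qs.flatMap suffix)),
           b - min b ((qs.flatMap suffix).length : Int)) := by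
  intro qs
  induction qs with
  | nil =>
    intro E b hb
    simp only [List.foldl_nil, List.flatMap_nil, List.take_nil, List.length_nil, Nat.cast_zero,
      Prod.mk.injEq, true_and]
    omega
  | cons q qs ih =>
    intro E b hb
    simp only [List.foldl_cons]
    rw [pvConsume_eq _ _ _ hb, ih _ _ (by omega)]
    have h1 : (b - min b ((suffix q).length : Int)).toNat = b.toNat - (suffix q).length := by omega
    rw [List.flatMap_cons, List.take_append, List.foldl_append, h1]
    simp only [Prod.mk.injEq, List.length_append, true_and]
    push_cast
    omega

-- A equals the canonical form: fold Set.add over the first max_size elements of the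
-- concatenated per-qubit suffixes
theorem pvA_eq_canon (twoq_qubits : List (Int × Int)) (per_qubit : List (List Int)) (pos : List Int)
    (max_size : Int) (hpos : ∀ x ∈ pos, -1 ≤ x) (hms : ¬ max_size ≤ 0) :
    extended_set_py twoq_qubits per_qubit pos max_size
      = List.foldl PySem.Set.add PySem.Set.empty
          (List.take max_size.toNat ((List.range pos.length).flatMap
            (fun q => (per_qubit.getD q []).drop (pos.getD q 0 + 1).toNat))) := by
  unfold extended_set_py
  simp only [if_neg hms]
  set n := pos.length with hn
  set suffix : Nat → List Int :=
    fun q => (per_qubit.getD q []).drop (pos.getD q 0 + 1).toNat with hsuffix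
  have hq0 : ∀ k : Nat, (0 : Int) ≤ pos.getD k 0 + 1 := by
    intro k
    rcases lt_or_ge k pos.length with hk | hk
    · have := hpos (pos.getD k 0) (List.getD_eq_getElem pos 0 hk ▸ List.getElem_mem hk)
      omega
    · rw [List.getD_eq_default pos 0 hk]
      omega
  rw [PySem.List.pyRange_zero_natCast]
  rw [List.filter_map, List.foldl_map]
  simp only [Function.comp_def, PySem.List.pyGetD_natCast]
  rw [← PySem.List.foldl_if_eq_foldl_filter]
  have hcongr : ∀ (s : PySem.Set Int × Int) (k : Nat), k ∈ List.range n →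
      (if decide (pos.getD k 0 < ((per_qubit.getD k []).length : Int)) = true then
        pvAInner (per_qubit.getD k []) s.1 s.2 (pos.getD k 0 + 1) (per_qubit.getD k []).length
       else s)
      = pvConsume (suffix k) s.1 s.2 := by
    intro s k _hk
    by_cases hfr : pos.getD k 0 < ((per_qubit.getD k []).length : Int)
    · simp only [hfr, decide_true, if_true]
      rw [pvAInner_eq_consume (per_qubit.getD k []) _ _ _ _ (hq0 k) (by omega)]
    · simp only [hfr, decide_false]
      have hnil : suffix k = [] := by
        rw [hsuffix]
        exact List.drop_eq_nil_of_le (by omega)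
      rw [hnil]
      rfl
  rw [PySem.List.foldl_congr_mem (List.range n) _
    (fun (s : PySem.Set Int × Int) q => pvConsume (suffix q) s.1 s.2) _ hcongr,
    pvFold_consume suffix (List.range n) PySem.Set.empty max_size (by omega)]

-- B-side proof helpers: running-sum list and its lookups
def pvScan (s : Int) : List Int → List Int
  | [] => []
  | a :: xs => (s + a) :: pvScan (s + a) xs

theorem pvGetD_neg_one (p : List Int) (h : p ≠ []) :
    PySem.List.pyGetD p (-1) 0 = p.getLast h := by
  have hl : 1 ≤ p.length := by cases p with | nil => simp at h | cons a t => simp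
  simp [PySem.List.pyGetD, PySem.List.pyIdx?, PySem.List.pyGet?, hl,
    List.getElem?_eq_getElem (by omega : p.length - 1 < p.length), List.getLast_eq_getElem]

theorem pvPrefix_fold (xs : List Int) :
    ∀ (p : List Int) (h : p ≠ []),
      xs.foldl (fun p a => p ++ [PySem.List.pyGetD p (-1) 0 + a]) p = p ++ pvScan (p.getLast h) xs := by
  induction xs with
  | nil => intro p h; simp [pvScan]
  | cons a xs ih =>
    intro p h
    simp only [List.foldl_cons, pvGetD_neg_one p h]
    rw [ih (p ++ [p.getLast h + a]) (by simp)]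
    simp [pvScan]

theorem pvScan_getD (xs : List Int) :
    ∀ (s : Int) (q : Nat), q < xs.length →
      (pvScan s xs).getD q 0 = s + (xs.take (q + 1)).sum := by
  induction xs with
  | nil => intro s q hq; simp at hq
  | cons a xs ih =>
    intro s q hq
    cases q with
    | zero => simp [pvScan]
    | succ q =>
      simp only [pvScan, List.getD_cons_succ, List.take_succ_cons, List.sum_cons]
      rw [ih (s + a) q (by simpa using hq)]
      ring

theorem pvPrefix_getD (xs : List Int) (q : Nat) (hq : q ≤ xs.length) :
    (0 :: pvScan 0 xs).getD q 0 = (xs.take q).sum := by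
  cases q with
  | zero => simp
  | succ q =>
    simp only [List.getD_cons_succ]
    rw [pvScan_getD xs 0 q (by omega)]
    simp

-- a fold of per-element block folds is one fold over the concatenation
theorem pvFoldBlocks (c : Nat → List Int) :
    ∀ (qs : List Nat) (E : PySem.Set Int),
      qs.foldl (fun E q => (c q).foldl PySem.Set.add E) E = (qs.flatMap c).foldl PySem.Set.add E := by
  intro qs
  induction qs with
  | nil => intro E; simp
  | cons q qs ih => intro E; simp only [List.foldl_cons, List.flatMap_cons, List.foldl_append, ih]

-- the arithmetically allocated blocks concatenate to the first b elements of the whole stream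
theorem pvAlloc (suffix : Nat → List Int) (b : Int) (hb : 0 ≤ b) :
    ∀ (m : Nat),
      (List.range m).flatMap (fun q => (suffix q).take
          (min ((suffix q).length : Int)
            (max 0 (b - (((List.range q).flatMap suffix).length : Int)))).toNat)
        = ((List.range m).flatMap suffix).take b.toNat := by
  intro m
  induction m with
  | zero => simp
  | succ m ih =>
    rw [List.range_succ, List.flatMap_append, List.flatMap_append, ih,
      List.flatMap_singleton, List.flatMap_singleton, List.take_append]
    congr 1
    apply List.take_eq_take_iff.mpr
    set L := (suffix m).length
    set P := ((List.range m).flatMap suffix).length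
    rcases le_or_gt b P with h | h
    · have : max 0 (b - (P : Int)) = 0 := by omega
      rw [this]
      omega
    · have : max 0 (b - (P : Int)) = b - P := by omega
      rw [this]
      omega

-- B equals the same canonical form
theorem pvB_eq_canon (twoq_qubits : List (Int × Int)) (per_qubit : List (List Int)) (pos : List Int)
    (max_size : Int) (hpos : ∀ x ∈ pos, -1 ≤ x) (hms : ¬ max_size ≤ 0) :
    extended_set_py_alt twoq_qubits per_qubit pos max_size
      = List.foldl PySem.Set.add PySem.Set.empty
          (List.take max_size.toNat ((List.range pos.length).flatMap
            (fun q => (per_qubit.getD q []).drop (pos.getD q 0 + 1).toNat))) := by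
  unfold extended_set_py_alt
  simp only [if_neg hms]
  set n := pos.length with hn
  set suffix : Nat → List Int :=
    fun q => (per_qubit.getD q []).drop (pos.getD q 0 + 1).toNat with hsuffix
  have hq0 : ∀ k : Nat, (0 : Int) ≤ pos.getD k 0 + 1 := by
    intro k
    rcases lt_or_ge k pos.length with hk | hk
    · have := hpos (pos.getD k 0) (List.getD_eq_getElem pos 0 hk ▸ List.getElem_mem hk)
      omega
    · rw [List.getD_eq_default pos 0 hk]
      omega
  -- pass 1: avail is the list of suffix lengths
  have havail : (PySem.List.pyRange 0 (n : Int)).map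
      (fun q => max 0 (((PySem.List.pyGetD per_qubit q []).length : Int) - (PySem.List.pyGetD pos q 0 + 1)))
      = (List.range n).map (fun k => ((suffix k).length : Int)) := by
    rw [PySem.List.pyRange_zero_natCast, List.map_map]
    apply List.map_congr_left
    intro k _
    simp only [Function.comp_def, PySem.List.pyGetD_natCast, hsuffix, List.length_drop]
    have := hq0 k
    omega
  rw [havail]
  set avail := (List.range n).map (fun k => ((suffix k).length : Int)) with havaildef
  -- pass 2: prefixs is the running-sum list
  rw [pvPrefix_fold avail [0] (by simp)]
  simp only [List.getLast_singleton, List.singleton_append]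
  -- lookups used by pass 3
  have hlen_avail : avail.length = n := by simp [havaildef]
  have hav_get : ∀ k : Nat, k < n → avail.getD k 0 = ((suffix k).length : Int) := by
    intro k hk
    rw [havaildef, List.getD_eq_getElem _ 0 (by simpa using hk)]
    simp
  have hpre_get : ∀ k : Nat, k ≤ n →
      (0 :: pvScan 0 avail).getD k 0 = (((List.range k).flatMap suffix).length : Int) := by
    intro k hk
    rw [pvPrefix_getD avail k (by omega), havaildef, ← List.map_take, List.take_range,
      min_eq_left hk, List.length_flatMap]
    induction (List.range k) with
    | nil => simp
    | cons x xs ihx => simp_all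
  -- pass 3: each step folds one block; congr to the canonical chunk, then concatenate
  rw [PySem.List.pyRange_zero_natCast, List.foldl_map]
  have hcongr : ∀ (E : PySem.Set Int) (k : Nat), k ∈ List.range n →
      ((fun E q =>
        (PySem.List.slice (PySem.List.pyGetD per_qubit q [])
          (some (PySem.List.pyGetD pos q 0 + 1))
          (some ((PySem.List.pyGetD pos q 0 + 1) +
            min (PySem.List.pyGetD avail q 0)
              (max 0 (max_size - PySem.List.pyGetD (0 :: pvScan 0 avail) q 0))))).foldl
        PySem.Set.add E) E ((k : Nat) : Int))
      = ((suffix k).take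
          (min ((suffix k).length : Int)
            (max 0 (max_size - (((List.range k).flatMap suffix).length : Int)))).toNat).foldl
          PySem.Set.add E := by
    intro E k hk
    have hk' : k < n := List.mem_range.mp hk
    simp only [PySem.List.pyGetD_natCast, hav_get k hk', hpre_get k (by omega)]
    set t := min ((suffix k).length : Int)
      (max 0 (max_size - (((List.range k).flatMap suffix).length : Int))) with ht
    have ht0 : 0 ≤ t := by
      rw [ht]
      have : (0 : Int) ≤ ((suffix k).length : Int) := by positivity
      omega
    have hs0 := hq0 k
    rw [PySem.List.slice_toNat _ hs0 (by omega)]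
    have harith : ((pos.getD k 0 + 1) + t).toNat - (pos.getD k 0 + 1).toNat = t.toNat := by omega
    rw [harith, hsuffix]
  rw [PySem.List.foldl_congr_mem (List.range n) _
      (fun (E : PySem.Set Int) (k : Nat) =>
        ((suffix k).take
          (min ((suffix k).length : Int)
            (max 0 (max_size - (((List.range k).flatMap suffix).length : Int)))).toNat).foldl
          PySem.Set.add E) _ hcongr,
    pvFoldBlocks _ (List.range n) PySem.Set.empty, pvAlloc suffix max_size (by omega) n]

-- ===== VERDICT (by name: the statement is the Claim_ definition above) =====
theorem extended_set_py_spec : Claim_equal_extended_set_py := by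
  intro twoq_qubits per_qubit pos max_size _hdom hpre
  unfold Spec_extended_set_py
  by_cases hms : max_size ≤ 0
  · unfold extended_set_py extended_set_py_alt
    simp [hms]
  · rcases hpre with h | ⟨_hlen, hpos⟩
    · omega
    rw [pvA_eq_canon twoq_qubits per_qubit pos max_size hpos hms,
      pvB_eq_canon twoq_qubits per_qubit pos max_size hpos hms]
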